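-- pv_equiv track=rewrite | github.com/nunzio998/scraping_twitter | BeautifulSoup_osint/firefox/utils.py | read_posts
-- ===== SOURCE A (Python) =====
-- def read_posts(filtered_lines):
--     posts = []  # lista che conterrà tutti i post
--     post = []  # lista di appoggio temporanea per salvare le righe di un post
--
--     for i in range(0, len(filtered_lines)):
--         # controllo se lines[i] è l'ultimo elemento della lista
--         stripped_line = filtered_lines[i].strip()
--
--         # se sono all'ultimo elemento della lista, aggiungo la riga a post e poi aggiungo post a posts
--         if i == len(filtered_lines) - 1:
--             post.append(stripped_line)
--             posts.append(post)
--             break  # esco dal ciclo for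
--
--         # controllo che il carattere in cui mi trovo non sia il primo di un nuovo post.
--         # se cosi fosse il carattere successivo sarà un tag_username e quindi inizierà con '@'. In tal caso non aggiungo a post e vado avanti
--         if (not filtered_lines[i + 1].strip()[0] == '@') or i == 0:
--             post.append(stripped_line)
--         else:  # ho letto un intero post
--             posts.append(post)
--             post = [stripped_line]  # resetto la lista di appoggio per il prossimo post
--     return posts
-- ===== SOURCE B (Python) =====
-- def read_posts(filtered_lines):
--     stripped = [line.strip() for line in filtered_lines]
--     if not stripped:
--         return []
--     n = len(stripped)
--     cuts = [i for i in range(1, n - 1) if stripped[i + 1][:1] == '@']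
--     bounds = [0] + cuts + [n]
--     return [stripped[a:b] for a, b in zip(bounds, bounds[1:])]
-- ===== Notes on version B (the rewrite author's own statement) =====
-- stated objective: alternative
-- what changed: A threads mutable posts/post accumulators through one stateful loop with a break and a reset; B instead computes the cut indices with a comprehension and slices the stripped list at those boundaries, with no accumulator state.
import Mathlib
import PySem

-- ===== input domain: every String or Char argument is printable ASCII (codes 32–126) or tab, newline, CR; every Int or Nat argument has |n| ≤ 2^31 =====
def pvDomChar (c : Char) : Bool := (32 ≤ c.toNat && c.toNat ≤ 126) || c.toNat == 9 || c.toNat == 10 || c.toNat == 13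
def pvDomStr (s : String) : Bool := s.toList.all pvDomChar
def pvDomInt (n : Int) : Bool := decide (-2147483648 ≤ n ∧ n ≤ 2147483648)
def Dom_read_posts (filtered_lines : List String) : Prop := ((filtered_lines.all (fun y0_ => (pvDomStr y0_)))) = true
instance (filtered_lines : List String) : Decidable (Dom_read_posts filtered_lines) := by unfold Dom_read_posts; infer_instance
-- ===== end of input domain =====

-- B replaces A's stateful accumulator loop (posts/post with a reset and a break) by computing
-- the cut indices and slicing the stripped list at those boundaries (objective: alternative
-- decomposition, same cost).

-- ===== PORT A =====
-- loop over `i in range(0, len(filtered_lines))` with state (posts, post); the `break` at the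
-- last index is the first branch.  Where Python raises IndexError (a line after the first that
-- strips to "", excluded by Pre_) the pyGet? is none and the port returns an arbitrary value.
set_option maxHeartbeats 1000000 in
def read_posts_loop (fl : List String) (i : Nat) (posts : List (List String)) (post : List String) : List (List String) :=
  if h : i < fl.length then
    let stripped_line := PySem.Str.strip fl[i]
    if i = fl.length - 1 then
      posts ++ [post ++ [stripped_line]]
    else
      match PySem.Str.pyGet? (PySem.Str.strip (fl.getD (i + 1) "")) 0 with
      | none => posts  -- IndexError in Python; outside Pre_
      | some c =>
        if (!(c == '@')) || i = 0 then
          read_posts_loop fl (i + 1) posts (post ++ [stripped_line])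
        else
          read_posts_loop fl (i + 1) (posts ++ [post]) [stripped_line]
  else posts
termination_by fl.length - i
decreasing_by all_goals omega

def read_posts (filtered_lines : List String) : List (List String) :=
  read_posts_loop filtered_lines 0 [] []

-- ===== PORT B =====
def read_posts_alt (filtered_lines : List String) : List (List String) :=
  let stripped := filtered_lines.map PySem.Str.strip
  if stripped.isEmpty then []
  else
    let n : Int := stripped.length
    let cuts := (PySem.List.pyRange 1 (n - 1) 1).filter
      (fun i => PySem.Str.slice (PySem.List.pyGetD stripped (i + 1) "") none (some 1) == "@")
    let bounds := [(0 : Int)] ++ cuts ++ [n]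
    (bounds.zip (PySem.List.slice bounds (some 1) none)).map
      (fun p => PySem.List.slice stripped (some p.1) (some p.2))

-- ===== PRECONDITION & SPEC =====
-- Pre_ excludes exactly the inputs on which A raises IndexError: some line after the first
-- strips to the empty string (stripped[i+1][0] is evaluated before the 'or i == 0' guard).
def Pre_read_posts (filtered_lines : List String) : Prop :=
  ∀ l ∈ filtered_lines.drop 1, PySem.Str.strip l ≠ ""
instance (filtered_lines : List String) : Decidable (Pre_read_posts filtered_lines) := by
  unfold Pre_read_posts; infer_instance

def pvWitness_read_posts : List String := ["hello world", "@user", "more text", "@other"]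

def Spec_read_posts (filtered_lines : List String) (out : List (List String)) : Prop := out = read_posts_alt filtered_lines
instance (filtered_lines : List String) (out : List (List String)) : Decidable (Spec_read_posts filtered_lines out) := by unfold Spec_read_posts; infer_instance

-- ===== CLAIM (what is proved, stated in full; the proofs are below) =====
def Claim_equal_read_posts : Prop := ∀ (filtered_lines : List String), Dom_read_posts filtered_lines → Pre_read_posts filtered_lines → Spec_read_posts filtered_lines (read_posts filtered_lines)

-- ===== LEMMAS AND PROOFS =====

-- does stripped[j+1] start with '@'?  (over the already-stripped list s)
def pvPred (s : List String) (j : Nat) : Bool := (s.getD (j + 1) "").toList[0]? == some '@'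

-- the cut indices ≥ i:  {c | i ≤ c ≤ n-2, s[c+1] starts with '@'}
def pvCuts (s : List String) (i : Nat) : List Nat :=
  (List.range' i (s.length - 1 - i)).filter (pvPred s)

-- chunks of s from index i cut at the indices cs, with `post` prepended to the first chunk
def pvMk (s : List String) : List String → Nat → List Nat → List (List String)
  | post, i, [] => [post ++ s.drop i]
  | post, i, c :: cs => (post ++ (s.drop i).take (c - i)) :: pvMk s [] c cs

theorem pvMk_absorb (s : List String) (post : List String) (i : Nat) (L : List Nat)
    (hi : i < s.length) (hL : ∀ c ∈ L, i < c) :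
    pvMk s post i L = pvMk s (post ++ [s[i]]) (i + 1) L := by
  have hdrop : s.drop i = s[i] :: s.drop (i + 1) := List.drop_eq_getElem_cons hi
  cases L with
  | nil => simp only [pvMk]; rw [hdrop]; simp
  | cons c cs =>
    have hc : i < c := hL c (by simp)
    have h2 : c - i = (c - (i + 1)) + 1 := by omega
    simp only [pvMk]; rw [h2, hdrop, List.take_succ_cons]; simp

theorem pvCuts_mem (s : List String) (i : Nat) : ∀ c ∈ pvCuts s i, i ≤ c ∧ c < s.length - 1 := by
  intro c hc
  have := List.mem_range'.mp (List.mem_of_mem_filter hc)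
  omega

theorem pvCuts_step (s : List String) (i : Nat) (h : i < s.length - 1) :
    pvCuts s i = (if pvPred s i then [i] else []) ++ pvCuts s (i + 1) := by
  have : s.length - 1 - i = (s.length - 1 - (i + 1)) + 1 := by omega
  rw [pvCuts, this, List.range'_succ, List.filter_cons]
  cases hp : pvPred s i <;> simp [pvCuts]

theorem pvCuts_last (s : List String) (i : Nat) (h : s.length - 1 ≤ i) : pvCuts s i = [] := by
  have : s.length - 1 - i = 0 := by omega
  simp [pvCuts, this]

theorem read_posts_loop_eq (fl : List String) (hpre : Pre_read_posts fl) :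
    ∀ d i posts post, fl.length - i ≤ d → 1 ≤ i → i < fl.length →
      read_posts_loop fl i posts post =
        posts ++ pvMk (fl.map PySem.Str.strip) post i (pvCuts (fl.map PySem.Str.strip) i) := by
  intro d
  induction d with
  | zero => intro i _ _ hd _ hn; omega
  | succ d ih =>
    intro i posts post hd h1 hn
    have hslen : (fl.map PySem.Str.strip).length = fl.length := List.length_map ..
    rw [read_posts_loop]
    simp only [dif_pos hn]
    by_cases hlast : i = fl.length - 1
    · simp only [if_pos hlast]
      rw [pvCuts_last _ _ (by omega)]
      have hi' : i < (fl.map PySem.Str.strip).length := by omega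
      have hdrop : (fl.map PySem.Str.strip).drop i = [(fl.map PySem.Str.strip)[i]] := by
        rw [List.drop_eq_getElem_cons hi', List.drop_eq_nil_of_le (by omega)]
      simp [pvMk, hdrop]
    · have hi1 : i + 1 < fl.length := by omega
      simp only [if_neg hlast]
      have hgd : fl.getD (i + 1) "" = fl[i + 1] := List.getD_eq_getElem fl "" hi1
      have hmem : fl[i + 1] ∈ fl.drop 1 := by
        have : (fl.drop 1)[i]'(by simp; omega) = fl[i + 1] := by
          rw [List.getElem_drop]; congr 1; omega
        rw [← this]; exact List.getElem_mem _
      have hne : (PySem.Str.strip fl[i + 1]).toList ≠ [] := by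
        intro h0
        exact hpre _ hmem (String.toList_inj.mp (by simpa using h0))
      obtain ⟨c, rest, hc⟩ : ∃ c rest, (PySem.Str.strip fl[i + 1]).toList = c :: rest := by
        cases h : (PySem.Str.strip fl[i + 1]).toList with
        | nil => exact absurd h hne
        | cons a t => exact ⟨a, t, rfl⟩
      have hpg : PySem.Str.pyGet? (PySem.Str.strip (fl.getD (i + 1) "")) 0 = some c := by
        rw [hgd]
        simp [hc]
      have hsget : (fl.map PySem.Str.strip).getD (i + 1) "" = PySem.Str.strip fl[i + 1] := by
        rw [List.getD_eq_getElem _ "" (by omega)]; simp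
      have hpred : pvPred (fl.map PySem.Str.strip) i = (c == '@') := by
        unfold pvPred; rw [hsget, hc]; simp
      have hmems := pvCuts_mem (fl.map PySem.Str.strip) (i + 1)
      have hgetI : (fl.map PySem.Str.strip)[i]'(by omega) = PySem.Str.strip fl[i] := by simp
      by_cases hat : c = '@'
      · have hcond : (!c == '@' || decide (i = 0)) = false := by simp [hat]; omega
        simp only [hpg, hcond, Bool.false_eq_true, if_false]
        rw [ih (i + 1) (posts ++ [post]) [PySem.Str.strip fl[i]] (by omega) (by omega) hi1]
        rw [pvCuts_step _ i (by omega), hpred, hat]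
        simp only [beq_self_eq_true, if_true]
        have habs : pvMk (fl.map PySem.Str.strip) [] i (pvCuts (fl.map PySem.Str.strip) (i + 1)) =
            pvMk (fl.map PySem.Str.strip) [PySem.Str.strip fl[i]] (i + 1)
              (pvCuts (fl.map PySem.Str.strip) (i + 1)) := by
          rw [pvMk_absorb _ _ _ _ (by omega) (fun c hc => by have := hmems c hc; omega)]
          simp [hgetI]
        simp [pvMk, habs]
      · have hcond : (!c == '@' || decide (i = 0)) = true := by simp [hat]
        simp only [hpg, hcond, if_true]
        rw [ih (i + 1) posts (post ++ [PySem.Str.strip fl[i]]) (by omega) (by omega) hi1]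
        rw [pvCuts_step _ i (by omega), hpred]
        simp only [hat, beq_iff_eq, if_false, List.nil_append]
        rw [pvMk_absorb (fl.map PySem.Str.strip) post i (pvCuts (fl.map PySem.Str.strip) (i + 1))
          (by omega) (fun c hc => by have := hmems c hc; omega), hgetI]

theorem pvStartsAt (str : String) :
    (PySem.Str.slice str none (some 1) == "@") = (str.toList[0]? == some '@') := by
  rw [Bool.eq_iff_iff]
  simp only [beq_iff_eq, ← String.toList_inj, PySem.Str.toList_slice]
  simp only [PySem.Chars.slice]
  rw [PySem.List.slice_to (xs := str.toList) (by norm_num)]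
  cases h : str.toList with
  | nil => simp
  | cons c t =>
    have : (1:Int).toNat = 1 := rfl
    rw [this]
    simp [List.take_succ_cons]

set_option maxHeartbeats 1000000 in
theorem pvCuts_cast (s : List String) :
    (PySem.List.pyRange 1 ((s.length : Int) - 1) 1).filter
        (fun i => PySem.Str.slice (PySem.List.pyGetD s (i + 1) "") none (some 1) == "@")
      = (pvCuts s 1).map (fun c : Nat => (c : Int)) := by
  rw [PySem.List.pyRange_one]
  have h1 : ((s.length : Int) - 1 - 1).toNat = s.length - 1 - 1 := by omega
  rw [h1]
  unfold pvCuts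
  rw [List.range'_eq_map_range, List.filter_map, List.filter_map, List.map_map]
  congr 1
  apply List.filter_congr
  intro k _
  have hcast : (1 : Int) + (k : Int) + 1 = ((k + 2 : Nat) : Int) := by push_cast; ring
  have h12 : 1 + k + 1 = k + 2 := by omega
  simp only [Function.comp, hcast, PySem.List.pyGetD_natCast, pvStartsAt, pvPred, h12]

theorem pvChunks (s : List String) : ∀ (cs : List Nat) (i : Nat),
    (((( i : Int) :: (cs.map (fun c : Nat => (c : Int)) ++ [(s.length : Int)])).zip
        (cs.map (fun c : Nat => (c : Int)) ++ [(s.length : Int)])).map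
      (fun p => PySem.List.slice s (some p.1) (some p.2))) = pvMk s [] i cs := by
  intro cs
  induction cs with
  | nil =>
    intro i
    simp only [List.map_nil, List.nil_append, List.zip_cons_cons, List.zip_nil_right,
      List.map_cons, List.map_nil, pvMk]
    rw [PySem.List.slice_natCast, List.take_of_length_le (by simp)]
  | cons c cs ih =>
    intro i
    simp only [List.map_cons, List.cons_append, List.zip_cons_cons, List.map_cons, pvMk]
    rw [PySem.List.slice_natCast]
    congr 1
    exact ih c

theorem read_posts_eq_mk (fl : List String) (hpre : Pre_read_posts fl) (hne : fl ≠ []) :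
    read_posts fl =
      pvMk (fl.map PySem.Str.strip) [] 0 (pvCuts (fl.map PySem.Str.strip) 1) := by
  have hlen : 0 < fl.length := List.length_pos_iff.mpr hne
  rw [read_posts, read_posts_loop]
  simp only [dif_pos hlen]
  by_cases h1 : fl.length = 1
  · simp only [if_pos (by omega : 0 = fl.length - 1)]
    rw [pvCuts_last _ _ (by simp [h1])]
    match fl, h1 with
    | [x], _ => simp [pvMk]
  · have h2 : 2 ≤ fl.length := by omega
    simp only [if_neg (by omega : ¬ (0 = fl.length - 1))]
    have hi1 : 1 < fl.length := by omega
    have hgd : fl.getD 1 "" = fl[1] := List.getD_eq_getElem fl "" hi1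
    have hmem : fl[1] ∈ fl.drop 1 := by
      have : (fl.drop 1)[0]'(by simp; omega) = fl[1] := by rw [List.getElem_drop]
      rw [← this]; exact List.getElem_mem _
    have hne1 : (PySem.Str.strip fl[1]).toList ≠ [] := by
      intro h0
      exact hpre _ hmem (String.toList_inj.mp (by simpa using h0))
    obtain ⟨c, rest, hc⟩ : ∃ c rest, (PySem.Str.strip fl[1]).toList = c :: rest := by
      cases h : (PySem.Str.strip fl[1]).toList with
      | nil => exact absurd h hne1
      | cons a t => exact ⟨a, t, rfl⟩
    have hpg : PySem.Str.pyGet? (PySem.Str.strip (fl.getD (0 + 1) "")) 0 = some c := by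
      rw [show (0 + 1) = 1 from rfl, hgd]
      simp [hc]
    simp only [hpg, decide_true, Bool.or_true, if_true, Nat.zero_add, List.nil_append]
    rw [read_posts_loop_eq fl hpre fl.length 1 [] [PySem.Str.strip fl[0]] (by omega) le_rfl hi1]
    have hmems := pvCuts_mem (fl.map PySem.Str.strip) 1
    rw [pvMk_absorb (fl.map PySem.Str.strip) [] 0 (pvCuts (fl.map PySem.Str.strip) 1)
      (by simpa using hlen) (fun c hc => by have := hmems c hc; omega)]
    simp

theorem read_posts_alt_eq_mk (fl : List String) (hne : fl ≠ []) :
    read_posts_alt fl =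
      pvMk (fl.map PySem.Str.strip) [] 0 (pvCuts (fl.map PySem.Str.strip) 1) := by
  have hmapne : fl.map PySem.Str.strip ≠ [] := by simpa using hne
  simp only [read_posts_alt]
  rw [if_neg (show ¬ ((fl.map PySem.Str.strip).isEmpty = true) by simpa using hne)]
  rw [PySem.List.slice_from_one, pvCuts_cast]
  simpa using pvChunks (fl.map PySem.Str.strip) (pvCuts (fl.map PySem.Str.strip) 1) 0

-- ===== VERDICT (by name: the statement is the Claim_ definition above) =====
theorem read_posts_spec : Claim_equal_read_posts := by
  intro fl _ hpre
  unfold Spec_read_posts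
  by_cases hne : fl = []
  · subst hne; rw [read_posts, read_posts_loop]; simp [read_posts_alt]
  · rw [read_posts_eq_mk fl hpre hne, read_posts_alt_eq_mk fl hne]
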